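-- pv_equiv track=rewrite | github.com/FPSG-UIUC/teaal-compiler | teaal/ir/partitioning.py | __used_parts
-- ===== SOURCE A (Python) =====
-- from typing import Any, Dict, Iterable, List, Optional, Set, Tuple
--
-- def __used_parts(tensor_ranks: List[str], parts: Iterable[Tuple[str, ...]],
--                  allow_swizzle: bool) -> Iterable[Tuple[str, ...]]:
--     """
--     Get the partitions used to partition the given ranks
--     """
--     used_parts = []
--     for part_ranks in parts:
--         # Check if this partitioning is used
--         used = True
--         next_ind = None
--         new_part_ranks = []
--         for part_rank in part_ranks:
--             tensor_rank = part_rank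
--             if tensor_rank not in tensor_ranks:
--                 used = False
--                 break
--
--             if next_ind is None:
--                 next_ind = tensor_ranks.index(tensor_rank) + 1
--                 new_part_ranks.append(tensor_rank)
--             elif allow_swizzle or (next_ind < len(tensor_ranks) and tensor_ranks[next_ind] == tensor_rank):
--                 next_ind += 1
--                 new_part_ranks.append(tensor_rank)
--             else:
--                 used = False
--                 break
--
--         if used:
--             used_parts.append(tuple(new_part_ranks))
--
--     return used_parts
-- ===== SOURCE B (Python) =====
-- from typing import Iterable, List, Tuple
--
-- def __used_parts(tensor_ranks: List[str], parts: Iterable[Tuple[str, ...]],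
--                  allow_swizzle: bool) -> Iterable[Tuple[str, ...]]:
--     """
--     Get the partitions used to partition the given ranks
--     """
--     rank_set = set(tensor_ranks)
--     used_parts = []
--     for part_ranks in parts:
--         part = list(part_ranks)
--         if not part:
--             used_parts.append(())
--         elif allow_swizzle:
--             if all(r in rank_set for r in part):
--                 used_parts.append(tuple(part))
--         elif part[0] in rank_set:
--             start = tensor_ranks.index(part[0])
--             if part == tensor_ranks[start:start + len(part)]:
--                 used_parts.append(tuple(part))
--     return used_parts
-- ===== Notes on version B (the rewrite author's own statement) =====
-- stated objective: simpler
-- what changed: Replaces A's stateful inner scan (used/next_ind flags, element-by-element rebuild with break) by a per-part closed test: empty parts emitted directly, swizzle = set-membership of all ranks, non-swizzle = the part equals the contiguous slice of tensor_ranks starting at the first occurrence of its head.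
import Mathlib
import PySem

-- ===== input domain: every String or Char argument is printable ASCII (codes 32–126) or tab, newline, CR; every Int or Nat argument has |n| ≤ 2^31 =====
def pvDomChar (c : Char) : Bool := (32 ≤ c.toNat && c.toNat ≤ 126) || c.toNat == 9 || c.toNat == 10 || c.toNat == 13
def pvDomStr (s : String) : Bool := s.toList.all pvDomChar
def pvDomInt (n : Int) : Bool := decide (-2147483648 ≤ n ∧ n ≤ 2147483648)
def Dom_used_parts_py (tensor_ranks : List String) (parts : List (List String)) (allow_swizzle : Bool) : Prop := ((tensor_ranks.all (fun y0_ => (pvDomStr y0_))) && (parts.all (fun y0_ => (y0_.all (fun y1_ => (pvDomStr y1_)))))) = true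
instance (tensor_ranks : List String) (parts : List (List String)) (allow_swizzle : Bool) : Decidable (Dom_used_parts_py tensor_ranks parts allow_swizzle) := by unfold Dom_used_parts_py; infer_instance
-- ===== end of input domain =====

-- B replaces A's stateful inner scan by a per-part closed test (set membership / slice equality); objective: simpler.

-- ===== PORT A =====
-- inner 'for part_rank in part_ranks' loop of A, with the break modelled as an early 'none'
-- (none = 'used' became False); state = (remaining ranks, next_ind, new_part_ranks).
-- 'tensor_ranks.index(tensor_rank)' is only evaluated after the membership check succeeded,
-- so the '.getD 0' default is unreachable.
def usedPartsInnerA (tr : List String) (swz : Bool) : List String → Option Int → List String → Option (List String)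
  | [], _, acc => some acc
  | r :: rest, nextInd, acc =>
    if tr.contains r then
      match nextInd with
      | none =>
          usedPartsInnerA tr swz rest (some (((PySem.List.index? tr r).getD 0 : Nat) + 1)) (acc ++ [r])
      | some ni =>
          if swz || (decide (ni < (tr.length : Int)) && (PySem.List.pyGet? tr ni == some r)) then
            usedPartsInnerA tr swz rest (some (ni + 1)) (acc ++ [r])
          else none
    else none

def used_parts_py (tensor_ranks : List String) (parts : List (List String)) (allow_swizzle : Bool) : List (List String) :=
  parts.foldl (fun used_parts part_ranks =>
    match usedPartsInnerA tensor_ranks allow_swizzle part_ranks none [] with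
    | some new_part_ranks => used_parts ++ [new_part_ranks]
    | none => used_parts) []

-- ===== PORT B =====
-- per-part test of B: empty part → emit; swizzle → all ranks in the set; otherwise the part
-- must equal the contiguous slice of tensor_ranks starting at the first occurrence of its head.
def usedPartsStepB (tr : List String) (rankSet : PySem.Set String) (swz : Bool)
    (acc : List (List String)) (part : List String) : List (List String) :=
  match part with
  | [] => acc ++ [[]]
  | r :: _ =>
    if swz then
      if part.all (fun x => PySem.Set.contains rankSet x) then acc ++ [part] else acc
    else if PySem.Set.contains rankSet r then
      let start : Nat := (PySem.List.index? tr r).getD 0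
      if part == PySem.List.slice tr (some (start : Int)) (some ((start : Int) + (part.length : Int))) then
        acc ++ [part]
      else acc
    else acc

def used_parts_py_alt (tensor_ranks : List String) (parts : List (List String)) (allow_swizzle : Bool) : List (List String) :=
  let rankSet := PySem.Set.ofList tensor_ranks
  parts.foldl (usedPartsStepB tensor_ranks rankSet allow_swizzle) []

-- ===== PRECONDITION & SPEC =====
def Spec_used_parts_py (tensor_ranks : List String) (parts : List (List String)) (allow_swizzle : Bool) (out : List (List String)) : Prop := out = used_parts_py_alt tensor_ranks parts allow_swizzle
instance (tensor_ranks : List String) (parts : List (List String)) (allow_swizzle : Bool) (out : List (List String)) : Decidable (Spec_used_parts_py tensor_ranks parts allow_swizzle out) := by unfold Spec_used_parts_py; infer_instance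

-- ===== CLAIM (what is proved, stated in full; the proofs are below) =====
def Claim_equal_used_parts_py : Prop := ∀ (tensor_ranks : List String) (parts : List (List String)) (allow_swizzle : Bool), Dom_used_parts_py tensor_ranks parts allow_swizzle → Spec_used_parts_py tensor_ranks parts allow_swizzle (used_parts_py tensor_ranks parts allow_swizzle)

-- ===== LEMMAS AND PROOFS =====

-- 'l is the contiguous block of tr starting at index i'
def isSliceAt (tr : List String) : Nat → List String → Bool
  | _, [] => true
  | i, r :: rest => (tr[i]? == some r) && isSliceAt tr (i + 1) rest

lemma isSliceAt_iff_take_drop (tr : List String) :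
    ∀ (l : List String) (i : Nat), isSliceAt tr i l = true ↔ l = (tr.drop i).take l.length := by
  intro l
  induction l with
  | nil => intro i; simp [isSliceAt]
  | cons r rest ih =>
    intro i
    simp only [isSliceAt, Bool.and_eq_true, beq_iff_eq, ih (i + 1)]
    have hdrop : tr.drop (i + 1) = (tr.drop i).tail := List.tail_drop.symm
    have hget : tr[i]? = (tr.drop i).head? := by
      rw [List.head?_eq_getElem?, List.getElem?_drop, Nat.add_zero]
    cases h : (tr.drop i) with
    | nil => simp [hget, h, hdrop]
    | cons x t =>
      simp [hget, h, hdrop]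
      exact fun _ => eq_comm

-- A's inner loop under swizzle: pure membership filter, accumulating the part itself
lemma usedPartsInnerA_swz (tr : List String) :
    ∀ (part : List String) (ni : Option Int) (acc : List String),
      usedPartsInnerA tr true part ni acc =
        if part.all tr.contains then some (acc ++ part) else none := by
  intro part
  induction part with
  | nil => intro ni acc; simp [usedPartsInnerA]
  | cons r rest ih =>
    intro ni acc
    by_cases h : r ∈ tr
    · cases ni with
      | none => simp [usedPartsInnerA, h, ih]
      | some n => simp [usedPartsInnerA, h, ih]
    · simp [usedPartsInnerA, h]

-- A's inner loop without swizzle, after the head has fixed next_ind = n: contiguity test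
lemma usedPartsInnerA_noswz (tr : List String) :
    ∀ (part : List String) (n : Int) (acc : List String), 0 ≤ n →
      usedPartsInnerA tr false part (some n) acc =
        if isSliceAt tr n.toNat part then some (acc ++ part) else none := by
  intro part
  induction part with
  | nil => intro n acc hn; simp [usedPartsInnerA, isSliceAt]
  | cons r rest ih =>
    intro n acc hn
    have hget? : PySem.List.pyGet? tr n = tr[n.toNat]? := by
      exact PySem.List.pyGet?_of_nonneg tr hn
    by_cases hget : tr[n.toNat]? = some r
    · have hmem : r ∈ tr := List.mem_of_getElem? hget
      obtain ⟨hklen, -⟩ := List.getElem?_eq_some_iff.mp hget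
      have hlt : n < (tr.length : Int) := by omega
      have hrec := ih (n + 1) (acc ++ [r]) (by omega)
      have htn : (n + 1).toNat = n.toNat + 1 := by omega
      rw [htn] at hrec
      simp [usedPartsInnerA, hmem, hget?, hget, hlt, isSliceAt, hrec]
    · have hcond : (decide (n < (tr.length : Int)) && (PySem.List.pyGet? tr n == some r)) = false := by
        simp [hget?, hget]
      have hsl : isSliceAt tr n.toNat (r :: rest) = false := by simp [isSliceAt, hget]
      simp [usedPartsInnerA, hcond, hsl]

-- Set.ofList membership test agrees with list membership
lemma setContains_eq (tr : List String) (x : String) :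
    PySem.Set.contains (PySem.Set.ofList tr) x = tr.contains x := by
  refine Bool.eq_iff_iff.mpr ?_
  rw [PySem.Set.contains_iff, PySem.Set.mem_ofList]
  simp

-- the two per-part step functions agree
lemma step_eq (tr : List String) (swz : Bool) (acc : List (List String)) (part : List String) :
    (match usedPartsInnerA tr swz part none [] with
     | some np => acc ++ [np]
     | none => acc) = usedPartsStepB tr (PySem.Set.ofList tr) swz acc part := by
  cases part with
  | nil => simp [usedPartsInnerA, usedPartsStepB]
  | cons r rest =>
    cases swz with
    | true =>
      rw [usedPartsInnerA_swz]
      simp only [usedPartsStepB, setContains_eq]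
      by_cases hall : (r :: rest).all tr.contains = true
      · rcases (by simpa using hall : r ∈ tr ∧ ∀ x ∈ rest, x ∈ tr) with ⟨h1, h2⟩
        simp [hall, h1]
        exact h2
      · have h' : ¬ (r ∈ tr ∧ ∀ x ∈ rest, x ∈ tr) := by simpa using hall
        push Not at h'
        simp [hall]
        exact h'
    | false =>
      by_cases hmemr : r ∈ tr
      · obtain ⟨k, hk⟩ : ∃ k, PySem.List.index? tr r = some k :=
          Option.isSome_iff_exists.mp ((PySem.List.index?_isSome_iff tr r).mpr hmemr)
        obtain ⟨hklt, hkeq, -⟩ := PySem.List.getElem_of_index?_eq_some hk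
        have hget : tr[k]? = some r := List.getElem?_eq_some_iff.mpr ⟨hklt, hkeq⟩
        have hL : usedPartsInnerA tr false (r :: rest) none [] =
            if isSliceAt tr (k + 1) rest then some (r :: rest) else none := by
          have hk' : List.idxOf? r tr = some k := by
            rw [← PySem.List.index?_eq_idxOf?]; exact hk
          have h1 : usedPartsInnerA tr false (r :: rest) none [] =
              usedPartsInnerA tr false rest (some ((k : Int) + 1)) [r] := by
            simp [usedPartsInnerA, hmemr, hk']
          rw [h1, usedPartsInnerA_noswz tr rest ((k : Int) + 1) [r] (by omega)]
          simp [show ((k : Int) + 1).toNat = k + 1 by omega]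
        have hslice : PySem.List.slice tr (some ((k : Nat) : Int))
            (some (((k : Nat) : Int) + ((r :: rest).length : Int))) =
            (tr.drop k).take (rest.length + 1) := by
          have h2 := PySem.List.slice_natCast_add tr k (rest.length + 1)
          push_cast at h2 ⊢
          convert h2 using 4
        have hiff : ((r :: rest) = (tr.drop k).take (rest.length + 1)) ↔
            isSliceAt tr (k + 1) rest = true := by
          have h3 := isSliceAt_iff_take_drop tr (r :: rest) k
          simp only [isSliceAt, hget, beq_self_eq_true, Bool.true_and, List.length_cons] at h3
          exact h3.symm
        rw [hL]
        simp only [usedPartsStepB, setContains_eq]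
        have hcr : tr.contains r = true := by simp [hmemr]
        simp only [hcr, if_true, hk, Option.getD_some, Bool.false_eq_true, if_false, hslice]
        by_cases hsl : isSliceAt tr (k + 1) rest = true
        · simp [hsl, hiff.mpr hsl]
        · have : ¬ ((r :: rest) = (tr.drop k).take (rest.length + 1)) := fun h => hsl (hiff.mp h)
          simp [hsl, this]
      · have hL : usedPartsInnerA tr false (r :: rest) none [] = none := by
          simp [usedPartsInnerA, hmemr]
        rw [hL]
        simp [usedPartsStepB, hmemr]

lemma fold_eq (tr : List String) (swz : Bool) :
    ∀ (parts : List (List String)) (acc : List (List String)),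
      parts.foldl (fun used_parts part_ranks =>
        match usedPartsInnerA tr swz part_ranks none [] with
        | some np => used_parts ++ [np]
        | none => used_parts) acc =
      parts.foldl (usedPartsStepB tr (PySem.Set.ofList tr) swz) acc := by
  intro parts acc
  simp only [step_eq]

-- ===== VERDICT (by name: the statement is the Claim_ definition above) =====
theorem used_parts_py_spec : Claim_equal_used_parts_py := by
  intro tr parts swz _
  unfold Spec_used_parts_py used_parts_py used_parts_py_alt
  exact fold_eq tr swz parts []
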